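-- pv_equiv track=rewrite | github.com/akathorn/codejam | archive/2022/Round 1C/tower.py | is_megatower
-- ===== SOURCE A (Python) =====
-- def is_megatower(tower) -> bool:
--     seen = []
--     i = 0
--     while i < len(tower):
--         letter = tower[i]
--         if letter in seen:
--             return False
--         seen.append(letter)
--         while i < len(tower) and tower[i] == letter:
--             i += 1
--     return True
-- ===== SOURCE B (Python) =====
-- def is_megatower(tower) -> bool:
--     # Two phases: collapse the tower into its run letters, then one distinctness check.
--     keys = []
--     for c in tower:
--         if not keys or keys[-1] != c:
--             keys.append(c)
--     return len(keys) == len(set(keys))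
-- ===== Notes on version B (the rewrite author's own statement) =====
-- stated objective: alternative
-- what changed: B first collapses the tower into its list of run letters with a single pass, then makes one distinctness check (len(keys) == len(set(keys))), instead of A's interleaved scan that tests each new letter against a growing list of already-used letters and early-returns.
import Mathlib
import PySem

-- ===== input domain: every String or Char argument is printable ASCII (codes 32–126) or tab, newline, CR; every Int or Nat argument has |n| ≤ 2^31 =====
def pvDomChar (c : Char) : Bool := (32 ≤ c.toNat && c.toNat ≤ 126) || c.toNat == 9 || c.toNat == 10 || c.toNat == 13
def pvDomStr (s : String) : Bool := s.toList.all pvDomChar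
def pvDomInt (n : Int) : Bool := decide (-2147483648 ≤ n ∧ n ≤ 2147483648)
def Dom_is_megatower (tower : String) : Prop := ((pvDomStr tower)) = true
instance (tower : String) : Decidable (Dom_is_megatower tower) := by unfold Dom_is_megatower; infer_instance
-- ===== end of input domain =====

-- B collapses the tower to its run letters in one pass and then does a single distinctness check;
-- alternative decomposition (two phases instead of A's interleaved scan with early return), same result.

-- ===== PORT A =====
-- outer while: take the letter at i, fail on a repeat, append to seen, inner while skips the run
def isMegaLoop (cs : List Char) (seen : List Char) : Bool :=
  match cs with
  | [] => true
  | c :: rest =>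
    if seen.contains c then false
    else isMegaLoop (rest.dropWhile (· == c)) (seen ++ [c])
termination_by cs.length
decreasing_by
  simp only [List.length_cons]
  have := List.length_dropWhile_le (· == c) rest
  omega

def is_megatower (tower : String) : Bool := isMegaLoop tower.toList []

-- ===== PORT B =====
-- 'if not keys or keys[-1] != c: keys.append(c)'  (keys[-1] via pyGetD, guarded by the emptiness test)
def altStep (keys : List Char) (c : Char) : List Char :=
  if keys.isEmpty = true ∨ PySem.List.pyGetD keys (-1) c ≠ c then keys ++ [c] else keys

def is_megatower_alt (tower : String) : Bool :=
  let keys := tower.toList.foldl altStep []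
  decide (PySem.List.len keys = PySem.Set.len (PySem.Set.ofList keys))

-- ===== PRECONDITION & SPEC =====
def Spec_is_megatower (tower : String) (out : Bool) : Prop := out = is_megatower_alt tower
instance (tower : String) (out : Bool) : Decidable (Spec_is_megatower tower out) := by unfold Spec_is_megatower; infer_instance

-- ===== CLAIM (what is proved, stated in full; the proofs are below) =====
def Claim_equal_is_megatower : Prop := ∀ (tower : String), Dom_is_megatower tower → Spec_is_megatower tower (is_megatower tower)

-- ===== LEMMAS AND PROOFS =====

-- proof-only helper: the sequence of run letters, by the structure of A's recursion
def runKeys : List Char → List Char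
  | [] => []
  | c :: rest => c :: runKeys (rest.dropWhile (· == c))
termination_by cs => cs.length
decreasing_by
  simp only [List.length_cons]
  have := List.length_dropWhile_le (· == c) rest
  omega

lemma foldl_altStep (cs : List Char) : ∀ (acc : List Char) (c : Char),
    cs.foldl altStep (acc ++ [c]) = (acc ++ [c]) ++ runKeys (cs.dropWhile (· == c)) := by
  induction cs with
  | nil => intro acc c; simp [runKeys]
  | cons c' cs ih =>
    intro acc c
    by_cases h : c' = c
    · subst h
      have hstep : altStep (acc ++ [c']) c' = acc ++ [c'] := by
        simp [altStep, PySem.List.pyGetD]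
      simp only [List.foldl_cons, hstep, List.dropWhile_cons, beq_self_eq_true, if_true]
      exact ih acc c'
    · have hlast : PySem.List.pyGetD (acc ++ [c]) (-1) c' = c := by
        rw [PySem.List.pyGetD_neg_ofNat (acc ++ [c]) 1 c' (by omega) (by simp)]
        simp
      have hstep : altStep (acc ++ [c]) c' = (acc ++ [c]) ++ [c'] := by
        simp only [altStep, hlast]
        have hne : c ≠ c' := fun hh => h hh.symm
        simp [hne]
      simp only [List.foldl_cons, hstep, List.dropWhile_cons]
      have hbe : (c' == c) = false := by simp [h]
      simp only [hbe, Bool.false_eq_true, if_false]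
      rw [ih (acc ++ [c]) c']
      simp [runKeys]

lemma altKeys_eq_runKeys (cs : List Char) : cs.foldl altStep [] = runKeys cs := by
  cases cs with
  | nil => simp [runKeys]
  | cons c cs =>
    have hstep : altStep [] c = [c] := by simp [altStep]
    simp only [List.foldl_cons, hstep]
    have := foldl_altStep cs [] c
    simpa [runKeys] using this

lemma loop_iff (n : Nat) : ∀ (cs : List Char), cs.length ≤ n → ∀ (seen : List Char),
    seen.Nodup → (isMegaLoop cs seen = true ↔ (seen ++ runKeys cs).Nodup) := by
  induction n with
  | zero =>
    intro cs hlen seen hnod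
    have : cs = [] := by cases cs <;> simp_all
    subst this
    simp [isMegaLoop, runKeys, hnod]
  | succ n ih =>
    intro cs hlen seen hnod
    cases cs with
    | nil => simp [isMegaLoop, runKeys, hnod]
    | cons c rest =>
      by_cases hc : c ∈ seen
      · have hcc : seen.contains c = true := by simpa using hc
        simp only [isMegaLoop, hcc, if_true, runKeys]
        constructor
        · intro h; exact absurd h (by simp)
        · intro h
          exfalso
          rcases (List.nodup_append.mp h) with ⟨_, _, hdisj⟩
          exact hdisj c hc c (by simp) rfl
      · have hcc : seen.contains c = false := by simpa using hc
        have hlen' : (rest.dropWhile (· == c)).length ≤ n := by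
          have := List.length_dropWhile_le (· == c) rest
          simp only [List.length_cons] at hlen; omega
        have hnod' : (seen ++ [c]).Nodup := by
          simp only [List.nodup_append]
          exact ⟨hnod, List.nodup_singleton c, fun a ha b hb => by
            simp at hb; subst hb; exact fun hac => hc (hac ▸ ha)⟩
        have := ih (rest.dropWhile (· == c)) hlen' (seen ++ [c]) hnod'
        simp only [isMegaLoop, hcc, Bool.false_eq_true, if_false]
        rw [this]
        simp [runKeys, List.append_assoc]

lemma ofList_len_iff (xs : List Char) :
    ((PySem.Set.ofList xs).length = xs.length) ↔ xs.Nodup := by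
  induction xs using List.reverseRecOn with
  | nil => simp [PySem.Set.ofList]
  | append_singleton xs x ih =>
    have hsplit : PySem.Set.ofList (xs ++ [x]) = PySem.Set.add (PySem.Set.ofList xs) x := by
      rw [PySem.Set.ofList_eq_foldl, PySem.Set.ofList_eq_foldl, List.foldl_append]
      rfl
    have hle : (PySem.Set.ofList xs).length ≤ xs.length := PySem.Set.length_ofList_le xs
    by_cases hx : x ∈ xs
    · have hadd : PySem.Set.add (PySem.Set.ofList xs) x = PySem.Set.ofList xs := by
        simp [PySem.Set.add, PySem.Set.contains, PySem.Set.mem_ofList, hx]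
      rw [hsplit, hadd, List.length_append]
      simp only [List.length_cons, List.length_nil]
      constructor
      · intro h; exact absurd h (by omega)
      · intro h
        exfalso
        rcases List.nodup_append.mp h with ⟨_, _, hdisj⟩
        exact hdisj x hx x (by simp) rfl
    · have hadd : PySem.Set.add (PySem.Set.ofList xs) x = PySem.Set.ofList xs ++ [x] := by
        simp [PySem.Set.add, PySem.Set.contains, PySem.Set.mem_ofList, hx]
      rw [hsplit, hadd, List.length_append, List.length_append]
      simp only [List.length_cons, List.length_nil]
      constructor
      · intro h
        have hxe : (PySem.Set.ofList xs).length = xs.length := by omega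
        refine List.nodup_append.mpr ⟨ih.mp hxe, List.nodup_singleton x, ?_⟩
        intro a ha b hb
        simp at hb; subst hb
        exact fun hax => hx (hax ▸ ha)
      · intro h
        have hxs := (List.nodup_append.mp h).1
        have := ih.mpr hxs
        omega

lemma alt_true_iff (tower : String) :
    is_megatower_alt tower = true ↔ (runKeys tower.toList).Nodup := by
  unfold is_megatower_alt
  rw [altKeys_eq_runKeys, decide_eq_true_iff]
  have hs : PySem.Set.len (PySem.Set.ofList (runKeys tower.toList))
      = ((PySem.Set.ofList (runKeys tower.toList)).length : Int) := rfl
  rw [PySem.List.len_eq, hs, Int.natCast_inj, eq_comm]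
  exact ofList_len_iff _

theorem is_megatower_spec : Claim_equal_is_megatower := by
  intro tower _
  unfold Spec_is_megatower
  rw [Bool.eq_iff_iff]
  unfold is_megatower
  rw [loop_iff tower.toList.length tower.toList le_rfl [] List.nodup_nil]
  rw [alt_true_iff]
  simp
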